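-- pv_equiv track=rewrite | github.com/cajaun/school-workspace | Python/COMP1126/week6/lab/question3.py | decodedString
-- ===== SOURCE A (Python) =====
-- def decodedString(string):
--
--     if not string:
--         return ""
--
--
--     firstCharacter = string[0]
--
--     ordResult = ord(firstCharacter)
--
--
--     if ordResult % 2 == 0:
--         decodedValue = chr(ordResult - 4)
--     else:
--         decodedValue = chr(ordResult - 2)
--
--
--     return decodedValue + decodedString(string[1:])
-- ===== SOURCE B (Python) =====
-- def decodedString(string):
--     # Build a translation table once over the distinct characters, then map in one pass.
--     table = {c: chr(ord(c) - 4) if ord(c) % 2 == 0 else chr(ord(c) - 2) for c in set(string)}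
--     return ''.join([table[c] for c in string])
-- ===== Notes on version B (the rewrite author's own statement) =====
-- stated objective: idiomatic
-- what changed: Replaces per-character recursion with string-slice copies by a precomputed translation table over the distinct characters followed by a single join/map pass.
import Mathlib
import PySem

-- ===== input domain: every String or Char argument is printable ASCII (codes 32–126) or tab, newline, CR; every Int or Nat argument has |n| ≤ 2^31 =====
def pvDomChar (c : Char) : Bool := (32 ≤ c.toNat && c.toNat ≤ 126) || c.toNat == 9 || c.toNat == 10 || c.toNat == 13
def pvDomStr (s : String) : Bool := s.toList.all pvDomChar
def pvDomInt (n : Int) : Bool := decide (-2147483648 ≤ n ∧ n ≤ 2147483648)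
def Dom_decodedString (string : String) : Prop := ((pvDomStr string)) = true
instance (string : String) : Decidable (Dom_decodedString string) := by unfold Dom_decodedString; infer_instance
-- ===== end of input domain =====

-- B replaces A's per-character recursion (with slice copies) by a translation table
-- built once over the distinct characters, applied in a single map pass.


-- ===== PORT A =====
-- A recurses on the string: decode the first character, recurse on the tail slice.
def decodedStringA : List Char → List Char
  | [] => []
  | c :: rest =>
      (if c.toNat % 2 == 0 then Char.ofNat (c.toNat - 4) else Char.ofNat (c.toNat - 2))
        :: decodedStringA rest

def decodedString (string : String) : String :=
  String.mk (decodedStringA string.toList)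

-- ===== PORT B =====
-- table = {c: chr(ord(c)-4) if ord(c)%2==0 else chr(ord(c)-2) for c in set(string)}
-- (Dict only looked up afterwards, so Set iteration order cannot matter.)
-- table[c] never raises KeyError since every c of string is in set(string); getD's default is unreachable.
def decodedString_alt (string : String) : String :=
  let table : PySem.Dict Char Char :=
    (PySem.Set.ofList string.toList).foldl
      (fun d c =>
        d.insert c (if c.toNat % 2 == 0 then Char.ofNat (c.toNat - 4) else Char.ofNat (c.toNat - 2)))
      PySem.Dict.empty
  String.mk (string.toList.map (fun c => table.getD c c))

-- ===== PRECONDITION & SPEC =====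
def Spec_decodedString (string : String) (out : String) : Prop := out = decodedString_alt string
instance (string : String) (out : String) : Decidable (Spec_decodedString string out) := by unfold Spec_decodedString; infer_instance

-- ===== CLAIM (what is proved, stated in full; the proofs are below) =====
def Claim_equal_decodedString : Prop := ∀ (string : String), Dom_decodedString string → Spec_decodedString string (decodedString string)

-- ===== LEMMAS AND PROOFS =====

def pvShift (c : Char) : Char :=
  if c.toNat % 2 == 0 then Char.ofNat (c.toNat - 4) else Char.ofNat (c.toNat - 2)

theorem decodedStringA_eq_map (l : List Char) : decodedStringA l = l.map pvShift := by
  induction l with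
  | nil => rfl
  | cons c rest ih => simp [decodedStringA, pvShift, ih]

theorem get?_foldl_insert_fn {α β : Type} [DecidableEq α] (f : α → β) (l : List α)
    (d : PySem.Dict α β) (c : α) :
    (l.foldl (fun d x => d.insert x (f x)) d).get? c
      = if c ∈ l then some (f c) else d.get? c := by
  induction l generalizing d with
  | nil => simp
  | cons a l ih =>
      simp only [List.foldl_cons, ih, List.mem_cons]
      by_cases hl : c ∈ l
      · simp [hl]
      · by_cases ha : c = a
        · subst ha; simp [hl, PySem.Dict.get?_insert_self]
        · simp [hl, ha, PySem.Dict.get?_insert_of_ne _ _ ha]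

theorem decodedString_spec : Claim_equal_decodedString := by
  intro string _
  unfold Spec_decodedString decodedString decodedString_alt
  rw [decodedStringA_eq_map]
  congr 1
  apply List.map_congr_left
  intro c hc
  have h := get?_foldl_insert_fn
    (fun c => if c.toNat % 2 == 0 then Char.ofNat (c.toNat - 4) else Char.ofNat (c.toNat - 2))
    (PySem.Set.ofList string.toList) PySem.Dict.empty c
  rw [PySem.Dict.getD_eq_get?_getD, h, if_pos (by simpa [PySem.Set.mem_ofList] using hc)]
  rfl
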